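-- pv_equiv track=rewrite | github.com/anshaduk/Tradexa_Automatic_Transaction_with_Row_Locking | lift_problem.py | schedule_lift
-- ===== SOURCE A (Python) =====
-- def schedule_lift(current_floor,requests):
--     upward = [req for req in requests if req > current_floor]
--     downward = [req for req in requests if req < current_floor ]
--
--     upward.sort()
--     downward.sort(reverse=True)
--
--     upward_distance = 0
--     prev_floor = current_floor
--     for floor in upward:
--         upward_distance += abs(floor - prev_floor)
--         prev_floor = floor
--     for floor in downward:
--         upward_distance += abs(floor - prev_floor)
--         prev_floor = floor
--
--
--     downward_distance = 0
--     prev_floor = current_floor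
--     for floor in downward:
--         downward_distance += abs(floor - prev_floor)
--         prev_floor = floor
--     for floor in upward:
--         downward_distance += abs(floor - prev_floor)
--         prev_floor = floor
--
--
--     if upward_distance <= downward_distance:
--         direction = "up"
--         path = upward + downward
--     else:
--         direction = "down"
--         path = downward + upward
--
--     return direction,path
-- ===== SOURCE B (Python) =====
-- def schedule_lift(current_floor, requests):
--     upward = sorted(r for r in requests if r > current_floor)
--     downward = sorted((r for r in requests if r < current_floor), reverse=True)
--     # each leg is monotonic, so the travelled distance telescopes to a closed form
--     top = upward[-1] if upward else current_floor
--     bottom = downward[-1] if downward else current_floor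
--     d_up_first = (top - current_floor) + (top - bottom if downward else 0)
--     d_down_first = (current_floor - bottom) + (top - bottom if upward else 0)
--     if d_up_first <= d_down_first:
--         return "up", upward + downward
--     return "down", downward + upward
-- ===== Notes on version B (the rewrite author's own statement) =====
-- stated objective: simpler
-- what changed: Replaces A's four accumulator loops over the sorted legs with closed-form telescoping arithmetic (each leg is monotonic, so its travelled distance is just endpoint differences); the path construction is unchanged.
import Mathlib
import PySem

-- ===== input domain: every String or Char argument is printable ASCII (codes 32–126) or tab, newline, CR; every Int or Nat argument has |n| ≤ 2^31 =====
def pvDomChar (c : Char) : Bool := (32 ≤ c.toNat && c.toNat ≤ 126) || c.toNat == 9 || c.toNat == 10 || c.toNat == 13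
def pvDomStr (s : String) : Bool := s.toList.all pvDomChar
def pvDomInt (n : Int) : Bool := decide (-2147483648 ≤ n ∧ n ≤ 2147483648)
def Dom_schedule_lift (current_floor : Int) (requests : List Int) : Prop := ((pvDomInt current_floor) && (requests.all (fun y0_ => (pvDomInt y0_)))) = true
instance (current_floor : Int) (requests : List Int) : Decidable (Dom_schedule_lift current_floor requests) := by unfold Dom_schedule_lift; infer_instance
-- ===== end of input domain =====

-- B replaces A's four distance-accumulating loops with closed-form telescoping arithmetic over the same sorted legs (objective: simpler).


-- ===== PORT A =====
-- A-side helper: the body of each of A's four loops (accumulated distance, previous floor).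
def pvStep (st : Int × Int) (floor : Int) : Int × Int := (st.1 + |floor - st.2|, floor)

def schedule_lift (current_floor : Int) (requests : List Int) : String × List Int :=
  let upward := PySem.List.sorted (requests.filter (fun req => decide (req > current_floor))) (fun x => x) false
  let downward := PySem.List.sorted (requests.filter (fun req => decide (req < current_floor))) (fun x => x) true
  let s1 := upward.foldl pvStep (0, current_floor)
  let s1 := downward.foldl pvStep s1
  let upward_distance := s1.1
  let s2 := downward.foldl pvStep (0, current_floor)
  let s2 := upward.foldl pvStep s2
  let downward_distance := s2.1
  if upward_distance ≤ downward_distance then ("up", upward ++ downward)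
  else ("down", downward ++ upward)

-- ===== PORT B =====
def schedule_lift_alt (current_floor : Int) (requests : List Int) : String × List Int :=
  let upward := PySem.List.sorted (requests.filter (fun req => decide (req > current_floor))) (fun x => x) false
  let downward := PySem.List.sorted (requests.filter (fun req => decide (req < current_floor))) (fun x => x) true
  let top := upward.getLast?.getD current_floor
  let bottom := downward.getLast?.getD current_floor
  let d_up_first := (top - current_floor) + (if downward.isEmpty then 0 else top - bottom)
  let d_down_first := (current_floor - bottom) + (if upward.isEmpty then 0 else top - bottom)
  if d_up_first ≤ d_down_first then ("up", upward ++ downward)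
  else ("down", downward ++ upward)

-- ===== PRECONDITION & SPEC =====
def Spec_schedule_lift (current_floor : Int) (requests : List Int) (out : String × List Int) : Prop := out = schedule_lift_alt current_floor requests
instance (current_floor : Int) (requests : List Int) (out : String × List Int) : Decidable (Spec_schedule_lift current_floor requests out) := by unfold Spec_schedule_lift; infer_instance

-- ===== CLAIM (what is proved, stated in full; the proofs are below) =====
def Claim_equal_schedule_lift : Prop := ∀ (current_floor : Int) (requests : List Int), Dom_schedule_lift current_floor requests → Spec_schedule_lift current_floor requests (schedule_lift current_floor requests)

-- ===== LEMMAS AND PROOFS =====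

-- getLast?.getD of a non-empty list ignores the default
theorem pvGetDLast_cons (b : Int) (t : List Int) (x y : Int) :
    ((b :: t).getLast?).getD x = ((b :: t).getLast?).getD y := by
  rw [List.getLast?_eq_some_getLast (l := b :: t) (by simp)]
  rfl

-- an ascending leg telescopes: the distance travelled is last − start
theorem foldl_leg_asc (l : List Int) (d prev : Int)
    (h : List.Pairwise (· ≤ ·) (prev :: l)) :
    l.foldl pvStep (d, prev) = (d + (l.getLast?.getD prev - prev), l.getLast?.getD prev) := by
  induction l generalizing d prev with
  | nil => simp
  | cons a t ih =>
      have hpc := List.pairwise_cons.1 h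
      have hpa : prev ≤ a := hpc.1 a (by simp)
      have hg : (a :: t).getLast?.getD prev = t.getLast?.getD a := by
        cases t with
        | nil => simp
        | cons b t' =>
            rw [List.getLast?_cons_cons]
            exact pvGetDLast_cons b t' prev a
      rw [List.foldl_cons]
      have hstep : pvStep (d, prev) a = (d + (a - prev), a) := by
        simp [pvStep, abs_of_nonneg (sub_nonneg.2 hpa)]
      rw [hstep, ih (d + (a - prev)) a hpc.2, hg]
      simp only [Prod.mk.injEq]
      exact ⟨by ring, trivial⟩

-- a descending leg telescopes: the distance travelled is start − last
theorem foldl_leg_desc (l : List Int) (d prev : Int)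
    (h : List.Pairwise (fun a b => b ≤ a) (prev :: l)) :
    l.foldl pvStep (d, prev) = (d + (prev - l.getLast?.getD prev), l.getLast?.getD prev) := by
  induction l generalizing d prev with
  | nil => simp
  | cons a t ih =>
      have hpc := List.pairwise_cons.1 h
      have hpa : a ≤ prev := hpc.1 a (by simp)
      have hg : (a :: t).getLast?.getD prev = t.getLast?.getD a := by
        cases t with
        | nil => simp
        | cons b t' =>
            rw [List.getLast?_cons_cons]
            exact pvGetDLast_cons b t' prev a
      rw [List.foldl_cons]
      have hstep : pvStep (d, prev) a = (d + (prev - a), a) := by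
        have : |a - prev| = prev - a := by rw [abs_sub_comm, abs_of_nonneg (sub_nonneg.2 hpa)]
        simp [pvStep, this]
      rw [hstep, ih (d + (prev - a)) a hpc.2, hg]
      simp only [Prod.mk.injEq]
      exact ⟨by ring, trivial⟩

-- ===== VERDICT (by name: the statement is the Claim_ definition above) =====
theorem schedule_lift_spec : Claim_equal_schedule_lift := by
  intro cur reqs _
  unfold Spec_schedule_lift schedule_lift schedule_lift_alt
  simp only []
  set up := PySem.List.sorted (reqs.filter (fun req => decide (req > cur))) (fun x => x) false with hup
  set down := PySem.List.sorted (reqs.filter (fun req => decide (req < cur))) (fun x => x) true with hdown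
  have hmu : ∀ x ∈ up, cur < x := by
    intro x hx
    have := (PySem.List.mem_sorted (xs := reqs.filter (fun req => decide (req > cur))) (key := fun x => x) (rev := false) (x := x)).1 (hup ▸ hx)
    simpa using (List.mem_filter.1 this).2
  have hmd : ∀ x ∈ down, x < cur := by
    intro x hx
    have := (PySem.List.mem_sorted (xs := reqs.filter (fun req => decide (req < cur))) (key := fun x => x) (rev := true) (x := x)).1 (hdown ▸ hx)
    simpa using (List.mem_filter.1 this).2
  have hpu : List.Pairwise (· ≤ ·) up := by
    have := PySem.List.sorted_pairwise (xs := reqs.filter (fun req => decide (req > cur))) (key := fun x => x)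
    simpa [← hup] using this
  have hpd : List.Pairwise (fun a b => b ≤ a) down := by
    have := PySem.List.sorted_pairwise_rev (xs := reqs.filter (fun req => decide (req < cur))) (key := fun x => x)
    simpa [← hdown] using this
  set top := up.getLast?.getD cur with htop
  set bottom := down.getLast?.getD cur with hbot
  have hcurtop : cur ≤ top := by
    cases hul : up.getLast? with
    | none => simp [htop, hul]
    | some t =>
        have : t ∈ up := List.mem_of_getLast? hul
        have := hmu t this
        simp [htop, hul]; omega
  have hbotcur : bottom ≤ cur := by
    cases hdl : down.getLast? with
    | none => simp [hbot, hdl]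
    | some b =>
        have : b ∈ down := List.mem_of_getLast? hdl
        have := hmd b this
        simp [hbot, hdl]; omega
  -- leg 1 of plan "up": cur through the ascending upward list
  have leg1 := foldl_leg_asc up 0 cur
    (List.pairwise_cons.2 ⟨fun x hx => le_of_lt (hmu x hx), hpu⟩)
  -- leg 2 of plan "up": top through the descending downward list
  have leg2 := foldl_leg_desc down (0 + (top - cur)) top
    (List.pairwise_cons.2 ⟨fun x hx => le_trans (le_of_lt (hmd x hx)) hcurtop, hpd⟩)
  -- leg 1 of plan "down": cur through the descending downward list
  have leg3 := foldl_leg_desc down 0 cur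
    (List.pairwise_cons.2 ⟨fun x hx => le_of_lt (hmd x hx), hpd⟩)
  -- leg 2 of plan "down": bottom through the ascending upward list
  have leg4 := foldl_leg_asc up (0 + (cur - bottom)) bottom
    (List.pairwise_cons.2 ⟨fun x hx => le_trans hbotcur (le_of_lt (hmu x hx)), hpu⟩)
  rw [leg1, ← htop, leg2, leg3, ← hbot, leg4]
  have hA : (0 + (top - cur) + (top - down.getLast?.getD top)) =
      (top - cur) + (if down.isEmpty then 0 else top - bottom) := by
    cases hd : down.getLast? with
    | none =>
        have hnil : down = [] := List.getLast?_eq_none_iff.1 hd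
        simp [hnil]
    | some b =>
        have hne : down ≠ [] := by intro h; rw [h] at hd; simp at hd
        have hie : down.isEmpty = false := by simpa using hne
        rw [hbot, hd, hie]
        simp
  have hB : (0 + (cur - bottom) + (up.getLast?.getD bottom - bottom)) =
      (cur - bottom) + (if up.isEmpty then 0 else top - bottom) := by
    cases hu : up.getLast? with
    | none =>
        have hnil : up = [] := List.getLast?_eq_none_iff.1 hu
        simp [hnil]
    | some a =>
        have hne : up ≠ [] := by intro h; rw [h] at hu; simp at hu
        have hie : up.isEmpty = false := by simpa using hne
        rw [htop, hu, hie]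
        simp
  rw [hA, hB]
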